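-- pv_equiv track=rewrite | github.com/mateusz-kleszcz/Algorithms-and-Data-Structures | kolosy/kolokwium I/pretty sort v2.py | count
-- ===== SOURCE A (Python) =====
-- def count(num):
--     nums = [0] * 10
--     while num > 0:
--         digit = num % 10
--         nums[digit] += 1
--         num //= 10
--
--     one = 0
--     more = 0
--     for el in nums:
--         if el == 1:
--             one += 1
--         elif el > 1:
--             more += 1
--
--     return one, more
-- ===== SOURCE B (Python) =====
-- def count(num):
--     # Single-pass categorization: instead of a 10-slot frequency table plus a
--     # second scan, keep two sets (digits seen exactly once, digits seen more
--     # than once) while extracting digits the same modulo way.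
--     seen = set()
--     duplicated = set()
--     while num > 0:
--         digit = num % 10
--         if digit in duplicated:
--             pass
--         elif digit in seen:
--             seen.discard(digit)
--             duplicated.add(digit)
--         else:
--             seen.add(digit)
--         num //= 10
--     return len(seen), len(duplicated)
-- ===== Notes on version B (the rewrite author's own statement) =====
-- stated objective: alternative
-- what changed: Replaced the 10-element frequency list plus a separate counting scan by a single-pass categorization into two sets (seen-once / seen-multiple), returning their sizes directly.
import Mathlib
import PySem

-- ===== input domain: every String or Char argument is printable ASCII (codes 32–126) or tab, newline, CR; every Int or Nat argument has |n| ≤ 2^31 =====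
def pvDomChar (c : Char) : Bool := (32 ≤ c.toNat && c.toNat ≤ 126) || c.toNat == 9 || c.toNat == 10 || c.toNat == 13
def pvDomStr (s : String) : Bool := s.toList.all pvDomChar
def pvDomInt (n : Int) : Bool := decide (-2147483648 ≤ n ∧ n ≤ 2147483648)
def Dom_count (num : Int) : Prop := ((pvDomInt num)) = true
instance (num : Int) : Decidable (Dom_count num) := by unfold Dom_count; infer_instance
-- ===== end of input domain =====

-- B replaces A's 10-slot frequency table plus second counting scan by a single-pass
-- categorization into two sets (seen once / seen multiple times); alternative decomposition, same cost.


-- ===== PORT A =====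
-- while num > 0: digit = num % 10; nums[digit] += 1; num //= 10
-- (the index num % 10 is always in [0, 10) here, so List.set / List.getD on the .toNat index is exact)
def countLoopA (num : Int) (nums : List Int) : List Int :=
  if 0 < num then
    countLoopA (PySem.Int.floordiv num 10)
      (nums.set (PySem.Int.mod num 10).toNat (nums.getD (PySem.Int.mod num 10).toNat 0 + 1))
  else nums
termination_by num.toNat
decreasing_by
  simp only [PySem.Int.floordiv_eq_ediv_of_pos (by omega : (0:Int) < 10)]
  omega

def count (num : Int) : Int × Int :=
  let nums := countLoopA num (List.replicate 10 0)
  nums.foldl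
    (fun (acc : Int × Int) el =>
      if el = 1 then (acc.1 + 1, acc.2)
      else if el > 1 then (acc.1, acc.2 + 1)
      else acc)
    (0, 0)

-- ===== PORT B =====
-- while num > 0: digit = num % 10; categorize digit into seen / duplicated; num //= 10
def countLoopB (num : Int) (seen dup : PySem.Set Int) : PySem.Set Int × PySem.Set Int :=
  if 0 < num then
    let digit := PySem.Int.mod num 10
    if PySem.Set.contains dup digit then
      countLoopB (PySem.Int.floordiv num 10) seen dup
    else if PySem.Set.contains seen digit then
      countLoopB (PySem.Int.floordiv num 10) (PySem.Set.discard seen digit) (PySem.Set.add dup digit)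
    else
      countLoopB (PySem.Int.floordiv num 10) (PySem.Set.add seen digit) dup
  else (seen, dup)
termination_by num.toNat
decreasing_by
  all_goals simp only [PySem.Int.floordiv_eq_ediv_of_pos (by omega : (0:Int) < 10)]
  all_goals omega

def count_alt (num : Int) : Int × Int :=
  let r := countLoopB num PySem.Set.empty PySem.Set.empty
  (PySem.Set.len r.1, PySem.Set.len r.2)

-- ===== PRECONDITION & SPEC =====
def Spec_count (num : Int) (out : Int × Int) : Prop := out = count_alt num
instance (num : Int) (out : Int × Int) : Decidable (Spec_count num out) := by unfold Spec_count; infer_instance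

-- ===== CLAIM (what is proved, stated in full; the proofs are below) =====
def Claim_equal_count : Prop := ∀ (num : Int), Dom_count num → Spec_count num (count num)

-- ===== LEMMAS AND PROOFS =====

-- The loop invariant tying A's frequency table to B's two sets.
def DigitInv (nums : List Int) (seen dup : List Int) : Prop :=
  nums.length = 10 ∧ seen.Nodup ∧ dup.Nodup ∧
  (∀ i : Nat, i < 10 → 0 ≤ nums.getD i 0) ∧
  (∀ x : Int, x ∈ seen ↔ 0 ≤ x ∧ x < 10 ∧ nums.getD x.toNat 0 = 1) ∧
  (∀ x : Int, x ∈ dup ↔ 0 ≤ x ∧ x < 10 ∧ 1 < nums.getD x.toNat 0)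

lemma getD_set_eq (nums : List Int) (k j : Nat) (v : Int) (hk : k < nums.length) :
    (nums.set k v).getD j 0 = if j = k then v else nums.getD j 0 := by
  by_cases h : j = k
  · subst h; simp [List.getD, List.getElem?_set_self hk]
  · simp [List.getD, List.getElem?_set_ne (fun he => h he.symm), h]

lemma inv_step (nums seen dup : List Int) (d : Int) (hd0 : 0 ≤ d) (hd10 : d < 10)
    (h : DigitInv nums seen dup) :
    DigitInv (nums.set d.toNat (nums.getD d.toNat 0 + 1))
      (if d ∈ dup then seen else if d ∈ seen then PySem.Set.discard seen d else PySem.Set.add seen d)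
      (if d ∈ dup then dup else if d ∈ seen then PySem.Set.add dup d else dup) := by
  obtain ⟨hlen, hnds, hndd, hnn, hs, hp⟩ := h
  have hdlt : d.toNat < nums.length := by omega
  have hget : ∀ x : Int, 0 ≤ x → x < 10 →
      (nums.set d.toNat (nums.getD d.toNat 0 + 1)).getD x.toNat 0
      = if x = d then nums.getD d.toNat 0 + 1 else nums.getD x.toNat 0 := by
    intro x hx0 hx10
    rw [getD_set_eq _ _ _ _ hdlt]
    by_cases hxd : x = d
    · simp [hxd]
    · have : x.toNat ≠ d.toNat := by omega
      simp [this, hxd]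
  have hod : 0 ≤ nums.getD d.toNat 0 := hnn d.toNat (by omega)
  refine ⟨by simp [hlen], ?_, ?_, ?_, ?_, ?_⟩
  · split_ifs <;>
      first
        | exact hnds
        | exact PySem.Set.nodup_discard seen d hnds
        | exact PySem.Set.nodup_add seen d hnds
  · split_ifs <;>
      first
        | exact hndd
        | exact PySem.Set.nodup_add dup d hndd
  · intro i hi
    rcases Nat.lt_or_ge i nums.length with hil | hil
    · rw [getD_set_eq _ _ _ _ hdlt]
      split_ifs with he
      · omega
      · exact hnn i hi
    · omega
  · intro x
    by_cases hxb : 0 ≤ x ∧ x < 10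
    · obtain ⟨hx0, hx10⟩ := hxb
      rw [hget x hx0 hx10]
      by_cases hxd : x = d
      · subst hxd
        rw [if_pos rfl]
        by_cases h1 : x ∈ dup
        · rw [if_pos h1]
          have h3 := (hp x).mp h1
          constructor
          · intro hc; have h4 := (hs x).mp hc; exfalso; omega
          · intro hc; exfalso; omega
        · rw [if_neg h1]
          by_cases h2 : x ∈ seen
          · rw [if_pos h2]
            have h3 := (hs x).mp h2
            rw [PySem.Set.mem_discard]
            constructor
            · intro hc; exact absurd rfl hc.2
            · intro hc; exfalso; omega
          · rw [if_neg h2]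
            have hne1 : nums.getD x.toNat 0 ≠ 1 := fun hc => h2 ((hs x).mpr ⟨hx0, hx10, hc⟩)
            have hng : ¬ 1 < nums.getD x.toNat 0 := fun hc => h1 ((hp x).mpr ⟨hx0, hx10, hc⟩)
            have hge : 0 ≤ nums.getD x.toNat 0 := hnn x.toNat (by omega)
            rw [PySem.Set.mem_add]
            constructor
            · intro _; exact ⟨hx0, hx10, by omega⟩
            · intro _; exact Or.inr rfl
      · rw [if_neg hxd]
        have hm : (x ∈ (if d ∈ dup then seen else if d ∈ seen then PySem.Set.discard seen d else PySem.Set.add seen d)) ↔ x ∈ seen := by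
          split_ifs
          · exact Iff.rfl
          · rw [PySem.Set.mem_discard]; tauto
          · rw [PySem.Set.mem_add]; tauto
        rw [hm, hs x]
    · have hnm : x ∉ seen := fun hc => hxb ⟨((hs x).mp hc).1, ((hs x).mp hc).2.1⟩
      have hxd : x ≠ d := fun hc => hxb (hc ▸ ⟨hd0, hd10⟩)
      constructor
      · intro hc
        exfalso
        revert hc
        split_ifs
        · exact hnm
        · rw [PySem.Set.mem_discard]; tauto
        · rw [PySem.Set.mem_add]; tauto
      · intro hc; exact absurd ⟨hc.1, hc.2.1⟩ hxb
  · intro x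
    by_cases hxb : 0 ≤ x ∧ x < 10
    · obtain ⟨hx0, hx10⟩ := hxb
      rw [hget x hx0 hx10]
      by_cases hxd : x = d
      · subst hxd
        rw [if_pos rfl]
        by_cases h1 : x ∈ dup
        · rw [if_pos h1]
          have h3 := (hp x).mp h1
          constructor
          · intro _; exact ⟨hx0, hx10, by omega⟩
          · intro _; exact h1
        · rw [if_neg h1]
          by_cases h2 : x ∈ seen
          · rw [if_pos h2]
            have h3 := (hs x).mp h2
            rw [PySem.Set.mem_add]
            constructor
            · intro _; exact ⟨hx0, hx10, by omega⟩
            · intro _; exact Or.inr rfl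
          · rw [if_neg h2]
            have hne1 : nums.getD x.toNat 0 ≠ 1 := fun hc => h2 ((hs x).mpr ⟨hx0, hx10, hc⟩)
            have hng : ¬ 1 < nums.getD x.toNat 0 := fun hc => h1 ((hp x).mpr ⟨hx0, hx10, hc⟩)
            have hge : 0 ≤ nums.getD x.toNat 0 := hnn x.toNat (by omega)
            constructor
            · intro hc; exact absurd hc h1
            · intro hc; exfalso; omega
      · rw [if_neg hxd]
        have hm : (x ∈ (if d ∈ dup then dup else if d ∈ seen then PySem.Set.add dup d else dup)) ↔ x ∈ dup := by
          split_ifs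
          · exact Iff.rfl
          · rw [PySem.Set.mem_add]; tauto
          · exact Iff.rfl
        rw [hm, hp x]
    · have hnm : x ∉ dup := fun hc => hxb ⟨((hp x).mp hc).1, ((hp x).mp hc).2.1⟩
      have hxd : x ≠ d := fun hc => hxb (hc ▸ ⟨hd0, hd10⟩)
      constructor
      · intro hc
        exfalso
        revert hc
        split_ifs
        · exact hnm
        · rw [PySem.Set.mem_add]; tauto
        · exact hnm
      · intro hc; exact absurd ⟨hc.1, hc.2.1⟩ hxb

lemma loop_inv (num : Int) (nums seen dup : List Int) (h : DigitInv nums seen dup) :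
    DigitInv (countLoopA num nums) (countLoopB num seen dup).1 (countLoopB num seen dup).2 := by
  by_cases hpos : 0 < num
  · rw [countLoopA, countLoopB]
    simp only [if_pos hpos]
    have hd0 : 0 ≤ PySem.Int.mod num 10 := PySem.Int.mod_nonneg num (by omega)
    have hd10 : PySem.Int.mod num 10 < 10 := PySem.Int.mod_lt num (by omega)
    have hstep := inv_step nums seen dup (PySem.Int.mod num 10) hd0 hd10 h
    by_cases h1 : PySem.Int.mod num 10 ∈ dup
    · simp only [if_pos h1] at hstep
      rw [if_pos ((PySem.Set.contains_iff _ _).mpr h1)]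
      exact loop_inv _ _ _ _ hstep
    · simp only [if_neg h1] at hstep
      rw [if_neg (fun hc => h1 ((PySem.Set.contains_iff _ _).mp hc))]
      by_cases h2 : PySem.Int.mod num 10 ∈ seen
      · simp only [if_pos h2] at hstep
        rw [if_pos ((PySem.Set.contains_iff _ _).mpr h2)]
        exact loop_inv _ _ _ _ hstep
      · simp only [if_neg h2] at hstep
        rw [if_neg (fun hc => h2 ((PySem.Set.contains_iff _ _).mp hc))]
        exact loop_inv _ _ _ _ hstep
  · rw [countLoopA, countLoopB]
    simp only [if_neg hpos]
    exact h
termination_by num.toNat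
decreasing_by
  all_goals simp only [PySem.Int.floordiv_eq_ediv_of_pos (by omega : (0:Int) < 10)]
  all_goals omega

lemma foldA_eq (l : List Int) (a b : Int) :
    l.foldl
      (fun (acc : Int × Int) el =>
        if el = 1 then (acc.1 + 1, acc.2)
        else if el > 1 then (acc.1, acc.2 + 1)
        else acc)
      (a, b)
    = (a + (l.countP (fun el => el == 1) : Int), b + (l.countP (fun el => decide (el > 1)) : Int)) := by
  induction l generalizing a b with
  | nil => simp
  | cons x l ih =>
    by_cases h1 : x = 1
    · simp [h1, ih]; ring_nf
    · by_cases h2 : x > 1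
      · simp [h1, h2, ih]; ring_nf
      · simp [h1, h2, ih]

lemma length_eq_filter_mem (s l : List Int) (hs : s.Nodup) (hl : l.Nodup)
    (hsub : ∀ x ∈ s, x ∈ l) :
    s.length = (l.filter (fun d => decide (d ∈ s))).length := by
  have hperm : (l.filter (fun d => decide (d ∈ s))).Perm s := by
    apply List.perm_of_nodup_nodup_toFinset_eq (hl.filter _) hs
    ext x
    simp only [List.mem_toFinset, List.mem_filter, decide_eq_true_eq]
    exact ⟨fun h => h.2, fun h => ⟨hsub x h, h⟩⟩
  exact hperm.length_eq.symm

lemma final_count (nums seen dup : List Int) (h : DigitInv nums seen dup) :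
    nums.foldl
      (fun (acc : Int × Int) el =>
        if el = 1 then (acc.1 + 1, acc.2)
        else if el > 1 then (acc.1, acc.2 + 1)
        else acc)
      (0, 0)
    = ((seen.length : Int), (dup.length : Int)) := by
  obtain ⟨hlen, hnds, hndd, _, hs, hp⟩ := h
  have hten : ([0,1,2,3,4,5,6,7,8,9] : List Int).Nodup := by decide
  have hmem10 : ∀ x : Int, 0 ≤ x → x < 10 → x ∈ ([0,1,2,3,4,5,6,7,8,9] : List Int) := by
    intro x h0 h10; simp; omega
  have hls : seen.length = (([0,1,2,3,4,5,6,7,8,9] : List Int).filter (fun d => decide (d ∈ seen))).length :=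
    length_eq_filter_mem seen _ hnds hten
      (fun x hx => hmem10 x ((hs x).mp hx).1 ((hs x).mp hx).2.1)
  have hlp : dup.length = (([0,1,2,3,4,5,6,7,8,9] : List Int).filter (fun d => decide (d ∈ dup))).length :=
    length_eq_filter_mem dup _ hndd hten
      (fun x hx => hmem10 x ((hp x).mp hx).1 ((hp x).mp hx).2.1)
  -- destructure the ten entries of nums
  match nums, hlen with
  | [a0,a1,a2,a3,a4,a5,a6,a7,a8,a9], _ =>
    rw [foldA_eq, hls, hlp]
    have hgs : ∀ d : Int, (d ∈ seen) = (0 ≤ d ∧ d < 10 ∧ List.getD [a0,a1,a2,a3,a4,a5,a6,a7,a8,a9] d.toNat 0 = 1) :=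
      fun d => propext (hs d)
    have hgp : ∀ d : Int, (d ∈ dup) = (0 ≤ d ∧ d < 10 ∧ 1 < List.getD [a0,a1,a2,a3,a4,a5,a6,a7,a8,a9] d.toNat 0) :=
      fun d => propext (hp d)
    simp only [hgs, hgp]
    rw [← List.countP_eq_length_filter, ← List.countP_eq_length_filter]
    norm_num [List.countP_cons, List.getD]
    simp only [show Int.toNat 2 = 2 from rfl, show Int.toNat 3 = 3 from rfl, show Int.toNat 4 = 4 from rfl, show Int.toNat 5 = 5 from rfl, show Int.toNat 6 = 6 from rfl, show Int.toNat 7 = 7 from rfl, show Int.toNat 8 = 8 from rfl, show Int.toNat 9 = 9 from rfl]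
    norm_num [List.getElem_cons_succ]
    exact ⟨rfl, rfl⟩

lemma inv_init : DigitInv (List.replicate 10 0) [] [] := by
  refine ⟨by simp, by simp, by simp, ?_, ?_, ?_⟩
  · intro i hi; rw [List.getD_replicate _ hi]
  · intro x
    simp only [List.not_mem_nil, false_iff]
    intro hc
    rw [List.getD_replicate _ (by omega : x.toNat < 10)] at hc
    omega
  · intro x
    simp only [List.not_mem_nil, false_iff]
    intro hc
    rw [List.getD_replicate _ (by omega : x.toNat < 10)] at hc
    omega

-- ===== VERDICT (by name: the statement is the Claim_ definition above) =====
theorem count_spec : Claim_equal_count := by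
  intro num _
  unfold Spec_count count count_alt
  have h := loop_inv num (List.replicate 10 0) [] [] inv_init
  have := final_count _ _ _ h
  simp only [PySem.Set.len, PySem.Set.empty] at *
  exact this
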